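-- pv_equiv track=rewrite | github.com/knyazevRm/yandex_task | trains_3/homework/1/F/F.py | filling_certain_area
-- ===== SOURCE A (Python) =====
-- def filling_certain_area(cells, a, b, num_of_system):
--     prev_cells = {0}
--     count_of_work_system = 0
--     for i in range(a - 1, b):
--         if cells[i] not in prev_cells:
--             prev_cells.add(cells[i])
--             count_of_work_system -= 1
--
--         cells[i] = num_of_system
--
--     return count_of_work_system + 1
-- ===== SOURCE B (Python) =====
-- def filling_certain_area(cells, a, b, num_of_system):
--     # Sort the range's values, then count distinct nonzero values by scanning
--     # adjacent runs of the sorted list; overwrite the range afterwards.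
--     vals = sorted(cells[i] for i in range(a - 1, b))
--     distinct = 0
--     prev = None
--     for v in vals:
--         if v != prev:
--             if v != 0:
--                 distinct += 1
--             prev = v
--     for i in range(a - 1, b):
--         cells[i] = num_of_system
--     return 1 - distinct
-- ===== Notes on version B (the rewrite author's own statement) =====
-- stated objective: alternative
-- what changed: Instead of a hash-set with a membership-test-and-decrement counter interleaved with the in-place overwrite, B sorts the range's original values and counts distinct nonzero values by scanning adjacent runs of the sorted list (run-length style), overwriting the range in a separate pass.
-- outside the precondition, e.g. on filling_certain_area([5], 0, 1, 7): A returns -1, B returns 0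
import Mathlib
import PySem

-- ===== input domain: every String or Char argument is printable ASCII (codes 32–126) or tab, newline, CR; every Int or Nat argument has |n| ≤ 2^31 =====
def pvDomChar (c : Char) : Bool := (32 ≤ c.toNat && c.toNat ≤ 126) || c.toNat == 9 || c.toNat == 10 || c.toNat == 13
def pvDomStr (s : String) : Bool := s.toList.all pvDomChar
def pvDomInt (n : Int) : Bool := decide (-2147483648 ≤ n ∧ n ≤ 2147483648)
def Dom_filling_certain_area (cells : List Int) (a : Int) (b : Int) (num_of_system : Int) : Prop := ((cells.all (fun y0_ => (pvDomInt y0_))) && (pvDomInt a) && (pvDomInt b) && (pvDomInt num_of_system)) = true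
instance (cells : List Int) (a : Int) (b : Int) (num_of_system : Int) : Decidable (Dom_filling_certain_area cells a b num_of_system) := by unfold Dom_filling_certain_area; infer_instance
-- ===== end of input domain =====

-- B sorts the range's original values and counts distinct nonzero values by scanning adjacent runs
-- (sort-then-scan instead of a hash set), overwriting in a separate pass — an alternative algorithm;
-- equivalence is about the RETURN value (both perform the same in-place overwrite within Pre_).


-- ===== PORT A =====
-- the for-loop of A: state = (mutated cells, prev_cells, count); returns the final count
def fcaLoop (cells : List Int) (i : Int) (b : Int) (num : Int)
    (prev : PySem.Set Int) (count : Int) : Int :=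
  if _h : i < b then
    match PySem.List.pyGet? cells i with
    | none => count      -- cells[i] raises IndexError in Python; unreachable under Pre_
    | some v =>
      if ¬ (PySem.Set.contains prev v) then
        fcaLoop (PySem.List.pySetD cells i num) (i + 1) b num (PySem.Set.add prev v) (count - 1)
      else
        fcaLoop (PySem.List.pySetD cells i num) (i + 1) b num prev count
  else count
termination_by (b - i).toNat
decreasing_by all_goals omega

def filling_certain_area (cells : List Int) (a : Int) (b : Int) (num_of_system : Int) : Int :=
  fcaLoop cells (a - 1) b num_of_system (PySem.Set.ofList [0]) 0 + 1

-- ===== PORT B =====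
-- B's scan over the sorted values: prev = last seen value (None before the first), d = distinct-so-far
def fcaScan : List Int → Option Int → Int → Int
  | [], _, d => d
  | v :: vs, prev, d =>
    if some v ≠ prev then
      fcaScan vs (some v) (if v ≠ 0 then d + 1 else d)
    else
      fcaScan vs prev d

def filling_certain_area_alt (cells : List Int) (a : Int) (b : Int) (num_of_system : Int) : Int :=
  let vals := PySem.List.sorted
    ((PySem.List.pyRange (a - 1) b 1).map (fun i => PySem.List.pyGetD cells i 0))
    (fun x => x) false
  let distinct := fcaScan vals none 0
  let _cells := (PySem.List.pyRange (a - 1) b 1).foldl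
    (fun cs i => PySem.List.pySetD cs i num_of_system) cells
  1 - distinct

-- ===== PRECONDITION & SPEC =====
-- Pre_ admits every empty range (b < a) and otherwise restricts to the natural 1-indexed domain
-- 1 ≤ a, b ≤ len(cells): on excluded non-empty ranges A either raises IndexError or starts at a
-- negative index, where Python's wraparound makes A read from the end of the list (possibly re-reading
-- cells it has just overwritten) — an accident of in-place indexing, while B reads the original values.
def Pre_filling_certain_area (cells : List Int) (a : Int) (b : Int) (num_of_system : Int) : Prop :=
  b < a ∨ (1 ≤ a ∧ b ≤ cells.length)
instance (cells : List Int) (a : Int) (b : Int) (num_of_system : Int) : Decidable (Pre_filling_certain_area cells a b num_of_system) := by unfold Pre_filling_certain_area; infer_instance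

def pvWitness_filling_certain_area : List Int × Int × Int × Int := ([3, 0, 3, 5], 2, 4, 7)

def Spec_filling_certain_area (cells : List Int) (a : Int) (b : Int) (num_of_system : Int) (out : Int) : Prop := out = filling_certain_area_alt cells a b num_of_system
instance (cells : List Int) (a : Int) (b : Int) (num_of_system : Int) (out : Int) : Decidable (Spec_filling_certain_area cells a b num_of_system out) := by unfold Spec_filling_certain_area; infer_instance

-- ===== CLAIM (what is proved, stated in full; the proofs are below) =====
def Claim_equal_filling_certain_area : Prop := ∀ (cells : List Int) (a : Int) (b : Int) (num_of_system : Int), Dom_filling_certain_area cells a b num_of_system → Pre_filling_certain_area cells a b num_of_system → Spec_filling_certain_area cells a b num_of_system (filling_certain_area cells a b num_of_system)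

-- ===== LEMMAS AND PROOFS =====

-- A's loop on the list of read values alone (mutation stripped)
def runA : List Int → PySem.Set Int → Int → Int
  | [], _, c => c
  | v :: vs, p, c =>
    if ¬ (PySem.Set.contains p v) then runA vs (PySem.Set.add p v) (c - 1) else runA vs p c

-- writes are invisible: each write happens at an index strictly below all later reads
theorem fcaLoop_eq_runA (cells : List Int) (i b num : Int) (prev : PySem.Set Int) (count : Int)
    (h0 : 0 ≤ i) (hb : b ≤ cells.length) :
    fcaLoop cells i b num prev count =
      runA ((PySem.List.pyRange i b 1).map (fun j => PySem.List.pyGetD cells j 0)) prev count := by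
  by_cases h : i < b
  · have hget : PySem.List.pyGet? cells i = some cells[i.toNat] :=
      PySem.List.pyGet?_eq_some_getElem cells h0 (by omega)
    have hgetD : PySem.List.pyGetD cells i 0 = cells[i.toNat] :=
      PySem.List.pyGetD_eq_getElem cells 0 h0 (by omega)
    have hmapeq :
        (PySem.List.pyRange (i + 1) b 1).map
            (fun j => PySem.List.pyGetD (PySem.List.pySetD cells i num) j 0) =
        (PySem.List.pyRange (i + 1) b 1).map (fun j => PySem.List.pyGetD cells j 0) := by
      apply List.map_congr_left
      intro j hj
      have hj' := (PySem.List.mem_pyRange_one).1 hj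
      have hj0 : 0 ≤ j := by omega
      rw [PySem.List.pySetD_of_nonneg cells num h0]
      rw [PySem.List.pyGetD_eq_getElem _ 0 hj0 (by rw [List.length_set]; omega),
          PySem.List.pyGetD_eq_getElem cells 0 hj0 (by omega)]
      have hne : i.toNat ≠ j.toNat := by omega
      exact List.getElem_set_ne hne (by rw [List.length_set]; omega)
    have hlen' : b ≤ (PySem.List.pySetD cells i num).length := by
      rw [PySem.List.pySetD_of_nonneg cells num h0]; simpa using hb
    have hrec1 := fcaLoop_eq_runA (PySem.List.pySetD cells i num) (i + 1) b num
      (prev.add cells[i.toNat]) (count - 1) (by omega) hlen'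
    have hrec2 := fcaLoop_eq_runA (PySem.List.pySetD cells i num) (i + 1) b num
      prev count (by omega) hlen'
    rw [hmapeq] at hrec1 hrec2
    rw [PySem.List.pyRange_one_cons h, List.map_cons, hgetD]
    rw [fcaLoop, dif_pos h, hget]
    simp only [runA]
    split_ifs with hc
    · exact hrec2
    · exact hrec1
  · rw [fcaLoop, dif_neg h, PySem.List.pyRange_one_eq_nil (by omega)]
    simp [runA]
termination_by (b - i).toNat
decreasing_by all_goals omega

-- the counter measures the growth of the set
theorem runA_eq_len (vs : List Int) (p : PySem.Set Int) (c : Int) :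
    runA vs p c = c + p.length - (PySem.Set.update p vs).length := by
  induction vs generalizing p c with
  | nil => simp [runA, PySem.Set.update]
  | cons v vs ih =>
    rw [PySem.Set.update_cons]
    simp only [runA]
    split_ifs with hc
    · have hv : v ∈ p := (PySem.Set.contains_iff p v).1 hc
      rw [ih, PySem.Set.add_of_mem hv]
    · have hv : v ∉ p := fun hm => hc ((PySem.Set.contains_iff p v).2 hm)
      rw [ih, PySem.Set.add_of_not_mem hv]
      simp only [List.length_append, List.length_cons, List.length_nil]
      push_cast
      omega

-- A's distinct-count as a Finset cardinality
theorem update_zero_len (vs : List Int) :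
    (PySem.Set.update (PySem.Set.ofList [0]) vs).length =
      1 + ((vs.filter (fun x => x ≠ 0)).toFinset).card := by
  rw [PySem.Set.update_eq_append_filter]
  have h1 : PySem.Set.ofList ([0] : List Int) = [0] := by decide
  rw [h1]
  simp only [List.length_append, List.length_cons, List.length_nil]
  have h2 : (PySem.Set.ofList vs).filter (fun y => !(PySem.Set.contains ([0] : List Int) y)) =
      (PySem.Set.ofList vs).filter (fun y => y ≠ 0) := by
    exact List.filter_congr (fun y _ => by by_cases h : y = 0 <;> simp [h, PySem.Set.contains])
  rw [h2]
  have hnd : ((PySem.Set.ofList vs).filter (fun y => y ≠ 0)).Nodup :=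
    (PySem.Set.nodup_ofList vs).filter _
  rw [← List.toFinset_card_of_nodup hnd]
  have hext : ((PySem.Set.ofList vs).filter (fun y => y ≠ 0)).toFinset =
      (vs.filter (fun x => x ≠ 0)).toFinset := by
    apply Finset.ext
    intro x
    simp [PySem.Set.mem_ofList]
  rw [hext]

-- B-side: counting run starts in a sorted list counts distinct values
theorem card_cons_nonzero (v : Int) (vs : List Int) (hv : v ≠ 0) :
    (((v :: vs).filter (fun x => x ≠ 0)).toFinset).card =
      1 + ((vs.filter (fun x => x ≠ 0 ∧ x ≠ v)).toFinset).card := by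
  have hfil : (v :: vs).filter (fun x => x ≠ 0) = v :: vs.filter (fun x => x ≠ 0) := by
    simp [hv]
  rw [hfil, List.toFinset_cons]
  have hS : (vs.filter (fun x => x ≠ 0 ∧ x ≠ v)).toFinset =
      ((vs.filter (fun x => x ≠ 0)).toFinset).erase v := by
    apply Finset.ext; intro x
    simp only [List.mem_toFinset, List.mem_filter, Finset.mem_erase]
    constructor
    · rintro ⟨hx, h0⟩
      simp only [decide_eq_true_eq] at h0 ⊢
      exact ⟨h0.2, hx, by simp [h0.1]⟩
    · rintro ⟨hne, hx, h0⟩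
      simp only [decide_eq_true_eq] at h0 ⊢
      exact ⟨hx, h0, hne⟩
  rw [hS]
  have hins : insert v ((vs.filter (fun x => x ≠ 0)).toFinset) =
      insert v (((vs.filter (fun x => x ≠ 0)).toFinset).erase v) := by
    apply Finset.ext; intro x
    by_cases hxv : x = v <;> simp [hxv]
  rw [hins, Finset.card_insert_of_notMem (Finset.notMem_erase v _)]
  omega

-- within a sorted tail whose elements all exceed p, the constraint x ≠ p is vacuous
theorem filter_drop_ne (vs : List Int) (p : Int) (hp : ∀ x ∈ vs, p < x) :
    vs.filter (fun x => x ≠ 0 ∧ x ≠ p) = vs.filter (fun x => x ≠ 0) := by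
  apply List.filter_congr
  intro x hx
  have := hp x hx
  simp only [decide_eq_decide]
  constructor
  · exact fun h => h.1
  · exact fun h => ⟨h, by omega⟩

theorem scan_some (s : List Int) (p : Int) (d : Int)
    (hs : s.Pairwise (· ≤ ·)) (hp : ∀ x ∈ s, p ≤ x) :
    fcaScan s (some p) d = d + ((s.filter (fun x => x ≠ 0 ∧ x ≠ p)).toFinset).card := by
  induction s generalizing p d with
  | nil => simp [fcaScan]
  | cons v vs ih =>
    have hvle : ∀ x ∈ vs, v ≤ x := fun x hx => (List.pairwise_cons.1 hs).1 x hx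
    have hvs : vs.Pairwise (· ≤ ·) := (List.pairwise_cons.1 hs).2
    by_cases hvp : v = p
    · subst hvp
      rw [fcaScan, if_neg (by simp)]
      rw [ih v d hvs hvle]
      have : (v :: vs).filter (fun x => x ≠ 0 ∧ x ≠ v) = vs.filter (fun x => x ≠ 0 ∧ x ≠ v) := by
        simp
      rw [this]
    · have hpv : p < v := lt_of_le_of_ne (hp v (by simp)) (Ne.symm hvp)
      rw [fcaScan, if_pos (by simp [hvp])]
      have hdrop : (v :: vs).filter (fun x => x ≠ 0 ∧ x ≠ p) = (v :: vs).filter (fun x => x ≠ 0) :=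
        filter_drop_ne _ p (by
          intro x hx
          rcases List.mem_cons.1 hx with h | h
          · omega
          · have := hvle x h; omega)
      rw [hdrop]
      rw [ih v _ hvs hvle]
      by_cases hv0 : v = 0
      · subst hv0
        rw [if_neg (by simp)]
        have h1 : (0 :: vs).filter (fun x : Int => x ≠ 0) = vs.filter (fun x : Int => x ≠ 0) := by
          simp
        have h2 : vs.filter (fun x : Int => x ≠ 0 ∧ x ≠ 0) = vs.filter (fun x : Int => x ≠ 0) := by
          apply List.filter_congr; intro x _; simp
        rw [h1, h2]
      · rw [if_pos (by simp [hv0]), card_cons_nonzero v vs hv0]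
        push_cast
        ring

theorem scan_none (s : List Int) (d : Int) (hs : s.Pairwise (· ≤ ·)) :
    fcaScan s none d = d + ((s.filter (fun x => x ≠ 0)).toFinset).card := by
  cases s with
  | nil => simp [fcaScan]
  | cons v vs =>
    have hvle : ∀ x ∈ vs, v ≤ x := fun x hx => (List.pairwise_cons.1 hs).1 x hx
    have hvs : vs.Pairwise (· ≤ ·) := (List.pairwise_cons.1 hs).2
    rw [fcaScan, if_pos (by simp)]
    rw [scan_some vs v _ hvs hvle]
    by_cases hv0 : v = 0
    · subst hv0
      rw [if_neg (by simp)]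
      have h1 : (0 :: vs).filter (fun x : Int => x ≠ 0) = vs.filter (fun x : Int => x ≠ 0) := by
        simp
      have h2 : vs.filter (fun x : Int => x ≠ 0 ∧ x ≠ 0) = vs.filter (fun x : Int => x ≠ 0) := by
        apply List.filter_congr; intro x _; simp
      rw [h1, h2]
    · rw [if_pos (by simp [hv0]), card_cons_nonzero v vs hv0]
      push_cast
      ring

-- ===== VERDICT (by name: the statement is the Claim_ definition above) =====
theorem filling_certain_area_spec : Claim_equal_filling_certain_area := by
  intro cells a b num _hdom hpre
  simp only [Spec_filling_certain_area, filling_certain_area, filling_certain_area_alt]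
  rcases hpre with hlt | ⟨ha, hb⟩
  · -- empty range: both sides are 1
    rw [fcaLoop, dif_neg (by omega), PySem.List.pyRange_one_eq_nil (by omega)]
    simp [PySem.List.sorted, fcaScan]
  · rw [fcaLoop_eq_runA cells (a - 1) b num _ 0 (by omega) hb, runA_eq_len, update_zero_len]
    generalize ((PySem.List.pyRange (a - 1) b 1).map (fun j => PySem.List.pyGetD cells j 0)) = vs
    have hperm : (PySem.List.sorted vs (fun x => x) false).Perm vs := PySem.List.sorted_perm vs _ _
    have hsorted : (PySem.List.sorted vs (fun x => x) false).Pairwise (· ≤ ·) := by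
      have := PySem.List.sorted_pairwise vs (fun x => x)
      simpa using this
    rw [scan_none _ 0 hsorted]
    have hfinset : (((PySem.List.sorted vs (fun x => x) false).filter (fun x => x ≠ 0)).toFinset) =
        ((vs.filter (fun x => x ≠ 0)).toFinset) :=
      List.toFinset_eq_of_perm _ _ (hperm.filter _)
    rw [hfinset]
    simp only [(by decide : (PySem.Set.ofList ([0] : List Int)) = [0]), List.length_cons,
      List.length_nil]
    push_cast
    omega
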